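-- pv_equiv track=rewrite | github.com/Foggalong/scraps | files/gsa/files/d3.py | solution
-- ===== SOURCE A (Python) =====
-- def solution(s):
--     bins = [[], [], [], []]
--     chars = "abcdefg"
--     counts = {c: s.count(c) for c in chars}
--
--     while counts:
--         m = max(counts, key=counts.get)
--         for i in range(counts[m]):
--             bins[i % 4].append(m)
--         counts.pop(m, None)
--
--     return bins
-- ===== SOURCE B (Python) =====
-- # B: replace A's repeated find-max-then-pop selection loop with one stable
-- # descending sort of the keys, then a single distribution pass (simpler).
-- def solution(s):
--     bins = [[], [], [], []]
--     counts = {c: s.count(c) for c in "abcdefg"}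
--     for c in sorted(counts, key=counts.get, reverse=True):
--         for i in range(counts[c]):
--             bins[i % 4].append(c)
--     return bins
-- ===== Notes on version B (the rewrite author's own statement) =====
-- stated objective: simpler
-- what changed: A's while-loop that repeatedly finds the max-count key and pops it from the dict is replaced by one stable descending sort of the keys (ties keep insertion order a..g, matching A's first-max tie-break) followed by a single distribution pass.
import Mathlib
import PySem

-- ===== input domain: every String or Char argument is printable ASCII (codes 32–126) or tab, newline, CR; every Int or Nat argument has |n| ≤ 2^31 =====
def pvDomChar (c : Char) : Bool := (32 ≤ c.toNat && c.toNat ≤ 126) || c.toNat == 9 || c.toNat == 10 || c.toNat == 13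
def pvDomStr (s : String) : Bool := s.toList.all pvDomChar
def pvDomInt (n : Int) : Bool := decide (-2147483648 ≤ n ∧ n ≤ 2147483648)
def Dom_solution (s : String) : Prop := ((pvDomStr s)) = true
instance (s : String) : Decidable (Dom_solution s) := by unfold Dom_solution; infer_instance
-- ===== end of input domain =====

-- B replaces A's repeated find-max-then-pop selection loop with one stable descending
-- sort of the keys followed by a single distribution pass (simpler; same cost).

-- shared helper: 's.count(c)' as a Python int
def pvCount (s : String) (c : Char) : Int := (PySem.Str.count s c.toString : Int)

-- shared helper: the inner loop 'for i in range(n): bins[i % 4].append(c)', identical in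
-- both Pythons ('i % 4' is always 0..3, so List.modify at that index is exact here)
def pvDistribute (bins : List (List String)) (c : Char) (n : Int) : List (List String) :=
  (PySem.List.pyRange 0 n 1).foldl
    (fun b i => b.modify ((PySem.Int.mod i 4).toNat) (fun l => l ++ [c.toString])) bins

-- ===== PORT A =====
-- 'while counts: m = max(counts, key=counts.get); for i in range(counts[m]): …; counts.pop(m, None)'
-- max over a dict iterates its keys in insertion order with key=counts.get (first max wins) =
-- PySem.List.max? counts.keys; 'counts[m]' is getD (m is always a present key: max?_mem)
def pvLoopA (counts : PySem.Dict Char Int) (bins : List (List String)) : List (List String) :=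
  match _hm : PySem.List.max? counts.keys (fun c => counts.getD c 0) with
  | none => bins          -- 'while counts:' — max? = none iff the dict is empty
  | some m => pvLoopA (counts.erase m) (pvDistribute bins m (counts.getD m 0))
termination_by counts.items.length
decreasing_by
  have hmem : m ∈ counts.keys := PySem.List.max?_mem _hm
  simp only [PySem.Dict.keys, List.mem_map] at hmem
  obtain ⟨p, hp, hpe⟩ := hmem
  exact List.length_filter_lt_length_iff_exists.mpr ⟨p, hp, by simp [hpe]⟩

def solution (s : String) : List (List String) :=
  pvLoopA
    ("abcdefg".toList.foldl
      (fun d c => d.insert c (pvCount s c)) PySem.Dict.empty)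
    [[], [], [], []]

-- ===== PORT B =====
def solution_alt (s : String) : List (List String) :=
  let counts := "abcdefg".toList.foldl
      (fun d c => d.insert c (pvCount s c)) PySem.Dict.empty
  (PySem.List.sorted counts.keys (fun c => counts.getD c 0) true).foldl
    (fun b c => pvDistribute b c (counts.getD c 0)) [[], [], [], []]

-- ===== PRECONDITION & SPEC =====
def Spec_solution (s : String) (out : List (List String)) : Prop := out = solution_alt s
instance (s : String) (out : List (List String)) : Decidable (Spec_solution s out) := by unfold Spec_solution; infer_instance

-- ===== CLAIM (what is proved, stated in full; the proofs are below) =====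
def Claim_equal_solution : Prop := ∀ (s : String), Dom_solution s → Spec_solution s (solution s)

-- ===== LEMMAS AND PROOFS =====

-- one step of the running-max fold inside max?
theorem pv_max?_cons (k : Char → Int) (a x : Char) (t : List Char) :
    PySem.List.max? (a :: x :: t) k
      = if k a < k x then PySem.List.max? (x :: t) k else PySem.List.max? (a :: t) k := by
  by_cases hx : k a < k x <;> simp [PySem.List.max?, hx]

-- where the first maximum sits: everything before it is strictly smaller, everything after is ≤
theorem pv_max?_split (k : Char → Int) :
    ∀ (t : List Char) (a m : Char), PySem.List.max? (a :: t) k = some m →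
      (m = a ∧ ∀ y ∈ t, k y ≤ k a) ∨
      (∃ u v, t = u ++ m :: v ∧ k a < k m ∧ (∀ y ∈ u, k y < k m) ∧ (∀ y ∈ v, k y ≤ k m)) := by
  intro t
  induction t with
  | nil => intro a m h; left; simp_all [PySem.List.max?]
  | cons x t ih =>
    intro a m h
    rw [pv_max?_cons] at h
    by_cases hx : k a < k x
    · rw [if_pos hx] at h
      rcases ih x m h with ⟨rfl, hall⟩ | ⟨u, v, rfl, h1, h2, h3⟩
      · right; exact ⟨[], t, rfl, hx, by simp, hall⟩
      · right; exact ⟨x :: u, v, rfl, lt_trans hx h1,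
          by intro y hy; rcases List.mem_cons.mp hy with rfl | hy; exact h1; exact h2 y hy, h3⟩
    · rw [if_neg hx] at h
      rcases ih a m h with ⟨rfl, hall⟩ | ⟨u, v, rfl, h1, h2, h3⟩
      · left; refine ⟨rfl, ?_⟩
        intro y hy; rcases List.mem_cons.mp hy with rfl | hy
        · omega
        · exact hall y hy
      · right; exact ⟨x :: u, v, rfl, h1,
          by intro y hy; rcases List.mem_cons.mp hy with rfl | hy; omega; exact h2 y hy, h3⟩

theorem pv_max?_first (k : Char → Int) (xs : List Char) (m : Char)
    (h : PySem.List.max? xs k = some m) :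
    ∃ u v, xs = u ++ m :: v ∧ (∀ y ∈ u, k y < k m) ∧ (∀ y ∈ v, k y ≤ k m) := by
  cases xs with
  | nil => simp [PySem.List.max?] at h
  | cons x t =>
    rcases pv_max?_split k t x m h with ⟨rfl, hall⟩ | ⟨u, v, rfl, h1, h2, h3⟩
    · exact ⟨[], t, rfl, by simp, hall⟩
    · exact ⟨x :: u, v, rfl,
        by intro y hy; rcases List.mem_cons.mp hy with rfl | hy; exact h1; exact h2 y hy, h3⟩

-- membership through the insertion-sort fold
theorem pv_mem_foldl_ins (before : Char → Char → Bool) :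
    ∀ (t acc : List Char) (z : Char),
      z ∈ t.foldl (fun acc x => PySem.List.insertBy before x acc) acc ↔ z ∈ acc ∨ z ∈ t := by
  intro t
  induction t with
  | nil => simp
  | cons x t ih =>
    intro acc z
    simp only [List.foldl_cons, ih, PySem.List.mem_insertBy, List.mem_cons]
    tauto

-- an element never moved in front of the head passes over it
theorem pv_foldl_ins_cons (before : Char → Char → Bool) :
    ∀ (t : List Char) (x : Char) (rest : List Char), (∀ y ∈ t, before y x = false) →
      t.foldl (fun acc z => PySem.List.insertBy before z acc) (x :: rest)
        = x :: t.foldl (fun acc z => PySem.List.insertBy before z acc) rest := by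
  intro t
  induction t with
  | nil => intro x rest _; rfl
  | cons y t ih =>
    intro x rest h
    simp only [List.foldl_cons, PySem.List.insertBy, h y (by simp)]
    exact ih x _ (fun z hz => h z (by simp [hz]))

-- inserting the first maximum: it lands at the head and stays there
theorem pv_foldl_ins_max (k : Char → Int) (u v : List Char) (m : Char) (acc : List Char)
    (hu : ∀ y ∈ u, k y < k m) (hv : ∀ y ∈ v, k y ≤ k m) (hacc : ∀ z ∈ acc, k z < k m) :
    (u ++ m :: v).foldl (fun acc z => PySem.List.insertBy (fun a b => decide (k b < k a)) z acc) acc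
      = m :: (u ++ v).foldl (fun acc z => PySem.List.insertBy (fun a b => decide (k b < k a)) z acc) acc := by
  rw [List.foldl_append, List.foldl_append, List.foldl_cons]
  have hr : ∀ z ∈ u.foldl (fun acc z => PySem.List.insertBy (fun a b => decide (k b < k a)) z acc) acc, k z < k m := by
    intro z hz
    rcases (pv_mem_foldl_ins _ u acc z).mp hz with h | h
    · exact hacc z h
    · exact hu z h
  have hins : PySem.List.insertBy (fun a b => decide (k b < k a)) m
      (u.foldl (fun acc z => PySem.List.insertBy (fun a b => decide (k b < k a)) z acc) acc)
      = m :: u.foldl (fun acc z => PySem.List.insertBy (fun a b => decide (k b < k a)) z acc) acc := by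
    cases hc : u.foldl (fun acc z => PySem.List.insertBy (fun a b => decide (k b < k a)) z acc) acc with
    | nil => rfl
    | cons z zs =>
      have : k z < k m := hr z (by rw [hc]; simp)
      simp [PySem.List.insertBy, this]
  rw [hins]
  exact pv_foldl_ins_cons _ v m _ (fun y hy => by simp [not_lt.mpr (hv y hy)])

-- SELECTION = STABLE DESCENDING SORT, one step: the first max is the head of the sort
theorem pv_sorted_rev_step (k : Char → Int) (xs : List Char) (m : Char)
    (h : PySem.List.max? xs k = some m) :
    PySem.List.sorted xs k true = m :: PySem.List.sorted (xs.erase m) k true := by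
  obtain ⟨u, v, rfl, hu, hv⟩ := pv_max?_first k xs m h
  have hmu : m ∉ u := fun hm => lt_irrefl _ (hu m hm)
  rw [List.erase_append_right _ hmu, List.erase_cons_head]
  rw [PySem.List.sorted_rev_eq_foldl_insertBy, PySem.List.sorted_rev_eq_foldl_insertBy]
  exact pv_foldl_ins_max k u v m [] hu hv (by simp)

-- insertion with pointwise-equal keys is insertion with either key
theorem pv_insertBy_congr (k1 k2 : Char → Int) (x : Char) (hx : k1 x = k2 x) :
    ∀ (acc : List Char), (∀ z ∈ acc, k1 z = k2 z) →
      PySem.List.insertBy (fun a b => decide (k1 b < k1 a)) x acc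
        = PySem.List.insertBy (fun a b => decide (k2 b < k2 a)) x acc := by
  intro acc
  induction acc with
  | nil => intro _; rfl
  | cons z zs ih =>
    intro h
    have hz := h z (by simp)
    simp only [PySem.List.insertBy, hz, hx, ih (fun w hw => h w (by simp [hw]))]

-- sorting depends on the key only through its values on the list
theorem pv_sorted_rev_congr (k1 k2 : Char → Int) :
    ∀ (xs : List Char), (∀ x ∈ xs, k1 x = k2 x) →
      PySem.List.sorted xs k1 true = PySem.List.sorted xs k2 true := by
  have main : ∀ (xs acc : List Char), (∀ x ∈ xs, k1 x = k2 x) → (∀ z ∈ acc, k1 z = k2 z) →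
      xs.foldl (fun acc x => PySem.List.insertBy (fun a b => decide (k1 b < k1 a)) x acc) acc
        = xs.foldl (fun acc x => PySem.List.insertBy (fun a b => decide (k2 b < k2 a)) x acc) acc := by
    intro xs
    induction xs with
    | nil => intro _ _ _; rfl
    | cons x t ih =>
      intro acc hxs hacc
      have hx := hxs x (by simp)
      simp only [List.foldl_cons]
      rw [pv_insertBy_congr k1 k2 x hx acc hacc]
      exact ih _ (fun y hy => hxs y (by simp [hy]))
        (fun z hz => by
          rcases (PySem.List.mem_insertBy _ x z acc).mp hz with rfl | hz
          · exact hx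
          · exact hacc z hz)
  intro xs h
  rw [PySem.List.sorted_rev_eq_foldl_insertBy, PySem.List.sorted_rev_eq_foldl_insertBy]
  exact main xs [] h (by simp)

-- Dict.erase facts
theorem pv_keys_erase (d : PySem.Dict Char Int) (m : Char) (hnd : d.keys.Nodup) :
    (d.erase m).keys = d.keys.erase m := by
  rw [List.Nodup.erase_eq_filter hnd]
  show (d.items.filter (fun p => !(p.1 == m))).map Prod.fst = (d.items.map Prod.fst).filter _
  induction d.items with
  | nil => rfl
  | cons p t ih => by_cases h : p.1 = m <;> simp_all [bne]

theorem pv_find?_filter (m c : Char) (h : c ≠ m) : ∀ (l : List (Char × Int)),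
    List.find? (fun p => p.1 == c) (l.filter (fun p => !(p.1 == m)))
      = List.find? (fun p => p.1 == c) l := by
  intro l; induction l with
  | nil => rfl
  | cons p t ih =>
    by_cases hp : p.1 = m
    · rw [List.filter_cons_of_neg (by simp [hp]),
        List.find?_cons_of_neg (by simp [hp]; exact fun e => h e.symm), ih]
    · by_cases hc : p.1 = c
      · rw [List.filter_cons_of_pos (by simp [hp]),
          List.find?_cons_of_pos (by simp [hc]), List.find?_cons_of_pos (by simp [hc])]
      · rw [List.filter_cons_of_pos (by simp [hp]),
          List.find?_cons_of_neg (by simp [hc]), List.find?_cons_of_neg (by simp [hc]), ih]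

theorem pv_get?_erase_ne (d : PySem.Dict Char Int) (m c : Char) (h : c ≠ m) :
    (d.erase m).get? c = d.get? c := by
  simp only [PySem.Dict.get?, PySem.Dict.erase]
  rw [pv_find?_filter m c h d.items]

theorem pv_getD_erase_ne (d : PySem.Dict Char Int) (m c : Char) (h : c ≠ m) :
    (d.erase m).getD c 0 = d.getD c 0 := by
  simp [PySem.Dict.getD, pv_get?_erase_ne d m c h]

-- MAIN: A's selection loop is B's sort-then-distribute fold
theorem pv_loopA_eq : ∀ (n : Nat) (d : PySem.Dict Char Int), d.items.length = n →
    d.keys.Nodup → ∀ (bins : List (List String)),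
    pvLoopA d bins
      = (PySem.List.sorted d.keys (fun c => d.getD c 0) true).foldl
          (fun b c => pvDistribute b c (d.getD c 0)) bins := by
  intro n
  induction n using Nat.strong_induction_on with
  | _ n ih =>
    intro d hlen hnd bins
    rw [pvLoopA.eq_def]
    cases hm : PySem.List.max? d.keys (fun c => d.getD c 0) with
    | none =>
      have : d.keys = [] := (PySem.List.max?_eq_none_iff _ _).mp hm
      simp [this, PySem.List.sorted]
    | some m =>
      simp only []
      have hmem : m ∈ d.keys := PySem.List.max?_mem hm
      -- the erased dict is strictly smaller
      have hlt : (d.erase m).items.length < n := by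
        rw [← hlen]
        simp only [PySem.Dict.keys, List.mem_map] at hmem
        obtain ⟨p, hp, hpe⟩ := hmem
        exact List.length_filter_lt_length_iff_exists.mpr ⟨p, hp, by simp [hpe]⟩
      have hnd' : (d.erase m).keys.Nodup := by
        rw [pv_keys_erase d m hnd]; exact List.Nodup.erase m hnd
      rw [ih _ hlt (d.erase m) rfl hnd']
      -- head of the sort is the first max
      rw [pv_sorted_rev_step (fun c => d.getD c 0) d.keys m hm, List.foldl_cons]
      -- align keys and key functions of the two folds
      rw [pv_keys_erase d m hnd]
      have hkey : ∀ c ∈ d.keys.erase m, (d.erase m).getD c 0 = d.getD c 0 := by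
        intro c hc
        exact pv_getD_erase_ne d m c ((List.Nodup.mem_erase_iff hnd).mp hc).1
      rw [pv_sorted_rev_congr (fun c => (d.erase m).getD c 0) (fun c => d.getD c 0) _ hkey]
      exact PySem.List.foldl_congr_mem _ _ _ _ (by
        intro acc x hx
        rw [hkey x ((PySem.List.mem_sorted _ _ _ _).mp hx)])

theorem pv_counts_nodup (s : String) :
    ("abcdefg".toList.foldl (fun d c => d.insert c (pvCount s c)) PySem.Dict.empty).keys.Nodup :=
  PySem.Dict.nodup_keys_foldl_insert _ (fun _ c => pvCount s c) _
    (by simp [PySem.Dict.empty, PySem.Dict.keys])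

-- ===== VERDICT (by name: the statement is the Claim_ definition above) =====
theorem solution_spec : Claim_equal_solution := by
  intro s _
  show solution s = solution_alt s
  unfold solution solution_alt
  simp only []
  exact pv_loopA_eq _ _ rfl (pv_counts_nodup s) _
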